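-- pv_equiv track=rewrite | github.com/stoppie/data_science | US_births/us_births_1994_2014.py | calc_counts
-- ===== SOURCE A (Python) =====
-- def calc_counts(data, column):
--     births_per_feature = {}
--
--     for item in data:
--         feature = item[column]
--         births = item[4]
--
--         if feature in births_per_feature:
--             births_per_feature[feature] = births_per_feature[feature] + births
--         else:
--             births_per_feature[feature] = births
--
--     return births_per_feature
-- ===== SOURCE B (Python) =====
-- def calc_counts(data, column):
--     # Two-phase: collect distinct feature values in first-occurrence order,
--     # then compute each group's total with a per-key scan.
--     keys = []
--     for item in data:
--         feature = item[column]
--         if feature not in keys: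
--             keys.append(feature)
--     return {k: sum(item[4] for item in data if item[column] == k) for k in keys}
-- ===== Notes on version B (the rewrite author's own statement) =====
-- stated objective: alternative
-- what changed: Replaces the single-pass dict accumulation with a two-phase scheme: first collect the distinct feature values in first-occurrence order, then build the result with a comprehension that sums item[4] over the rows matching each key.
import Mathlib
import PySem

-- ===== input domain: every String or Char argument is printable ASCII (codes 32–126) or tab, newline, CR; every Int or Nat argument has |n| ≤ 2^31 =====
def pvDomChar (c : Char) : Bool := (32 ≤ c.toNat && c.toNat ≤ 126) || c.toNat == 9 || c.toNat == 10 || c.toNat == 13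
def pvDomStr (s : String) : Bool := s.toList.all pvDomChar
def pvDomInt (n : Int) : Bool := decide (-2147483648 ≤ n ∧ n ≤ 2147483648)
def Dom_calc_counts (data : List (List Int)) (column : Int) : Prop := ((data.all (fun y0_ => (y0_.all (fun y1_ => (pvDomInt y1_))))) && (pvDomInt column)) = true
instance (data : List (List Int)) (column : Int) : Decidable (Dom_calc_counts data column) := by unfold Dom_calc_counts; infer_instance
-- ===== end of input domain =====

-- B replaces A's one-pass dict accumulation by a two-phase scheme (distinct keys
-- in first-occurrence order, then a per-key summing scan); objective: alternative.

-- ===== PORT A =====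
-- loop body of A: feature = item[column]; births = item[4]; accumulate into the dict
def aStep (column : Int) (d : PySem.Dict Int Int) (item : List Int) : PySem.Dict Int Int :=
  match PySem.List.pyGet? item column, PySem.List.pyGet? item 4 with
  | some feature, some births =>
      match PySem.Dict.get? d feature with
      | some v => d.insert feature (v + births)
      | none   => d.insert feature births
  | _, _ => d   -- Python raises IndexError here; excluded by Pre_

def calc_counts (data : List (List Int)) (column : Int) : List (Int × Int) :=
  (data.foldl (aStep column) PySem.Dict.empty).items

-- ===== PORT B =====
-- first loop of B: collect distinct feature values in first-occurrence order
def bKeyStep (column : Int) (ks : List Int) (item : List Int) : List Int :=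
  match PySem.List.pyGet? item column with
  | some feature => if feature ∈ ks then ks else ks ++ [feature]
  | none => ks   -- Python raises IndexError here; excluded by Pre_

-- body of B's sum(item[4] for item in data if item[column] == k)
def bSumStep (column : Int) (k : Int) (s : Int) (item : List Int) : Int :=
  match PySem.List.pyGet? item column with
  | some feature =>
      if feature = k then
        match PySem.List.pyGet? item 4 with
        | some births => s + births
        | none => s   -- Python raises IndexError here; excluded by Pre_
      else s
  | none => s   -- Python raises IndexError here; excluded by Pre_

def calc_counts_alt (data : List (List Int)) (column : Int) : List (Int × Int) :=
  (data.foldl (bKeyStep column) []).map (fun k => (k, data.foldl (bSumStep column k) 0))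

-- ===== PRECONDITION & SPEC =====
-- Pre_ excludes exactly the inputs on which A raises IndexError: some row shorter
-- than 5 (item[4]) or with column out of its index range (item[column]).
def Pre_calc_counts (data : List (List Int)) (column : Int) : Prop :=
  ∀ row ∈ data, PySem.Raise.InRange row.length column ∧ 5 ≤ row.length
instance (data : List (List Int)) (column : Int) : Decidable (Pre_calc_counts data column) := by
  unfold Pre_calc_counts; infer_instance
def pvWitness_calc_counts : List (List Int) × Int := ([[2000, 1, 1, 5, 8000], [2000, 1, 2, 6, 9000], [2001, 1, 1, 5, 100]], 0)

def Spec_calc_counts (data : List (List Int)) (column : Int) (out : List (Int × Int)) : Prop := out = calc_counts_alt data column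
instance (data : List (List Int)) (column : Int) (out : List (Int × Int)) : Decidable (Spec_calc_counts data column out) := by unfold Spec_calc_counts; infer_instance

-- ===== CLAIM (what is proved, stated in full; the proofs are below) =====
def Claim_equal_calc_counts : Prop := ∀ (data : List (List Int)) (column : Int), Dom_calc_counts data column → Pre_calc_counts data column → Spec_calc_counts data column (calc_counts data column)

-- ===== LEMMAS AND PROOFS =====

theorem bKeyStep_none {c : Int} {x : List Int} (ks : List Int)
    (hg : PySem.List.pyGet? x c = none) : bKeyStep c ks x = ks := by
  simp [bKeyStep, hg]

theorem bKeyStep_some {c f : Int} {x : List Int} (ks : List Int)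
    (hg : PySem.List.pyGet? x c = some f) :
    bKeyStep c ks x = if f ∈ ks then ks else ks ++ [f] := by
  simp [bKeyStep, hg]

theorem bSumStep_none {c : Int} {x : List Int} (k s : Int)
    (hg : PySem.List.pyGet? x c = none) : bSumStep c k s x = s := by
  simp [bSumStep, hg]

theorem bSumStep_ne {c f : Int} {x : List Int} (k s : Int)
    (hg : PySem.List.pyGet? x c = some f) (hne : f ≠ k) : bSumStep c k s x = s := by
  simp [bSumStep, hg, hne]

theorem bSumStep_eq {c f b : Int} {x : List Int} (k s : Int)
    (hg : PySem.List.pyGet? x c = some f) (hb : PySem.List.pyGet? x 4 = some b) :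
    bSumStep c k s x = if f = k then s + b else s := by
  by_cases he : f = k <;> simp [bSumStep, hg, hb, he]

theorem aStep_some {c f b : Int} {x : List Int} (d : PySem.Dict Int Int)
    (hg : PySem.List.pyGet? x c = some f) (hb : PySem.List.pyGet? x 4 = some b) :
    aStep c d x = (match PySem.Dict.get? d f with
      | some v => d.insert f (v + b)
      | none   => d.insert f b) := by
  simp [aStep, hg, hb]

theorem bKeys_nodup (c : Int) (l : List (List Int)) (ks : List Int) (h : ks.Nodup) :
    (l.foldl (bKeyStep c) ks).Nodup := by
  induction l generalizing ks with
  | nil => exact h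
  | cons x xs ih =>
      simp only [List.foldl_cons]
      apply ih
      cases hg : PySem.List.pyGet? x c with
      | none => rw [bKeyStep_none ks hg]; exact h
      | some f =>
          rw [bKeyStep_some ks hg]
          by_cases hf : f ∈ ks
          · simpa [hf] using h
          · rw [if_neg hf]
            refine List.Nodup.append h (List.nodup_singleton f) ?_
            simp [List.disjoint_singleton, hf]

theorem bKeys_sub (c : Int) (l : List (List Int)) (ks : List Int) :
    ks ⊆ l.foldl (bKeyStep c) ks := by
  induction l generalizing ks with
  | nil => exact fun _ h => h
  | cons x xs ih =>
      intro a ha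
      simp only [List.foldl_cons]
      apply ih
      cases hg : PySem.List.pyGet? x c with
      | none => rw [bKeyStep_none ks hg]; exact ha
      | some f =>
          rw [bKeyStep_some ks hg]
          by_cases hf : f ∈ ks <;> simp [hf, ha]

theorem bSum_zero (c k : Int) (l : List (List Int)) (ks : List Int) (s : Int)
    (h : k ∉ l.foldl (bKeyStep c) ks) : l.foldl (bSumStep c k) s = s := by
  induction l generalizing ks s with
  | nil => rfl
  | cons x xs ih =>
      simp only [List.foldl_cons] at h ⊢
      have hstep : k ∉ bKeyStep c ks x := fun hm => h (bKeys_sub c xs _ hm)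
      cases hg : PySem.List.pyGet? x c with
      | none =>
          rw [bSumStep_none k s hg]
          exact ih _ s h
      | some f =>
          rw [bKeyStep_some ks hg] at hstep
          have hne : f ≠ k := by
            by_cases hf : f ∈ ks
            · rw [if_pos hf] at hstep
              exact fun he => hstep (he ▸ hf)
            · rw [if_neg hf] at hstep
              simp only [List.mem_append, List.mem_singleton, not_or] at hstep
              exact fun he => hstep.2 he.symm
          rw [bSumStep_ne k s hg hne]
          exact ih _ s h

theorem get_mk_map (K : List Int) (S : Int → Int) (f : Int) (h : K.Nodup) :
    PySem.Dict.get? (PySem.Dict.mk (K.map (fun k => (k, S k)))) f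
      = if f ∈ K then some (S f) else none := by
  induction K with
  | nil => simp [PySem.Dict.get?]
  | cons k ks ih =>
      rcases List.nodup_cons.mp h with ⟨_, hnd⟩
      simp only [List.map_cons, PySem.Dict.get?_mk_cons]
      by_cases he : k = f
      · subst he; simp
      · have he' : f ≠ k := fun h' => he h'.symm
        simp [he, he', ih hnd]

theorem main_lemma (column : Int) (data : List (List Int))
    (h : ∀ row ∈ data, PySem.Raise.InRange row.length column ∧ 5 ≤ row.length) :
    data.foldl (aStep column) PySem.Dict.empty
      = PySem.Dict.mk ((data.foldl (bKeyStep column) []).map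
          (fun k => (k, data.foldl (bSumStep column k) 0))) := by
  induction data using List.reverseRecOn with
  | nil => rfl
  | append_singleton l x ih =>
      have hl : ∀ row ∈ l, PySem.Raise.InRange row.length column ∧ 5 ≤ row.length :=
        fun row hr => h row (List.mem_append_left _ hr)
      have hx := h x (List.mem_append_right _ (List.mem_singleton.mpr rfl))
      obtain ⟨f, hf⟩ : ∃ f, PySem.List.pyGet? x column = some f := by
        cases hg : PySem.List.pyGet? x column with
        | none => exact absurd hx.1 ((PySem.List.pyGet?_eq_none_iff x column).mp hg)
        | some f => exact ⟨f, rfl⟩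
      have h4 : (4 : Int).toNat < x.length := by omega
      have hb : PySem.List.pyGet? x 4 = some x[(4 : Int).toNat] := by
        rw [PySem.List.pyGet?_of_nonneg x (by norm_num : (0:Int) ≤ 4)]
        exact List.getElem?_eq_getElem h4
      simp only [List.foldl_append, List.foldl_cons, List.foldl_nil]
      rw [ih hl, aStep_some _ hf hb, bKeyStep_some _ hf]
      have hnd : (l.foldl (bKeyStep column) []).Nodup := bKeys_nodup column l [] List.nodup_nil
      rw [get_mk_map _ _ f hnd]
      by_cases hmem : f ∈ l.foldl (bKeyStep column) []
      · simp only [hmem, if_true]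
        apply PySem.Dict.ext
        have hcont : (PySem.Dict.mk ((l.foldl (bKeyStep column) []).map
            (fun k => (k, l.foldl (bSumStep column k) 0)))).contains f = true := by
          rw [PySem.Dict.contains_eq_isSome_get?, get_mk_map _ _ f hnd]
          simp [hmem]
        rw [PySem.Dict.items_insert_of_contains _ _ hcont]
        show (List.map _ _).map _ = List.map _ _
        rw [List.map_map]
        apply List.map_congr_left
        intro k hk
        rw [bSumStep_eq k _ hf hb]
        by_cases he : f = k
        · subst he; simp
        · have he' : k ≠ f := fun hh => he hh.symm
          simp [Function.comp, he, he']
      · simp only [hmem, if_false]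
        apply PySem.Dict.ext
        have hcont : (PySem.Dict.mk ((l.foldl (bKeyStep column) []).map
            (fun k => (k, l.foldl (bSumStep column k) 0)))).contains f = false := by
          rw [PySem.Dict.contains_eq_isSome_get?, get_mk_map _ _ f hnd]
          simp [hmem]
        rw [PySem.Dict.items_insert_of_not_contains _ _ hcont]
        show _ = List.map _ (_ ++ [f])
        rw [List.map_append]
        congr 1
        · apply List.map_congr_left
          intro k hk
          rw [bSumStep_eq k _ hf hb]
          have : ¬ (f = k) := fun h' => hmem (h' ▸ hk)
          simp [this]
        · have hSf : l.foldl (bSumStep column f) 0 = 0 := bSum_zero column f l [] 0 hmem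
          simp [bSumStep_eq f _ hf hb, hSf]

-- ===== VERDICT (by name: the statement is the Claim_ definition above) =====
theorem calc_counts_spec : Claim_equal_calc_counts := by
  intro data column _hdom hpre
  unfold Spec_calc_counts calc_counts calc_counts_alt
  rw [main_lemma column data hpre]
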